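-- pv_equiv track=rewrite | github.com/joram-b-m365group/Pawa-Ai | backend/ultimate_ai/orchestrator.py | _handle_social_message
-- ===== SOURCE A (Python) =====
-- from typing import List, Dict, Optional, Any
--
-- def _handle_social_message(message: str) -> Optional[str]:
--     """
--     Handle simple social messages for human-like conversation
--
--     Returns response if it's a social message, None otherwise
--     """
--     msg_lower = message.lower().strip()
--
--     # Greetings
--     greetings = {
--         "hi": "Hey! How can I help you today?",
--         "hello": "Hello! What can I do for you?",
--         "hey": "Hey there! What's on your mind?",
--         "good morning": "Good morning! How can I assist you today?",
--         "good afternoon": "Good afternoon! What can I help you with?",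
--         "good evening": "Good evening! How may I help you?"
--     }
--
--     for greeting, response in greetings.items():
--         if msg_lower == greeting or msg_lower == greeting + "!":
--             return response
--
--     # How are you variations
--     how_are_you = [
--         "how are you", "how are you?", "how r u", "how are u",
--         "how's it going", "how is it going", "what's up", "whats up",
--         "sup", "how you doing"
--     ]
--     if msg_lower in how_are_you:
--         return "I'm doing great, thanks for asking! I'm excited to help you with whatever you need. What's on your mind today?"
--
--     # Thank you
--     thanks = ["thank you", "thanks", "thx", "ty", "thank u", "thank you!", "thanks!"]
--     if msg_lower in thanks:
--         return "You're very welcome! Happy to help anytime. Is there anything else you'd like to explore?"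
--
--     # Affirmations
--     affirmations = ["ok", "okay", "cool", "nice", "great", "awesome", "perfect"]
--     if msg_lower in affirmations or msg_lower in [a + "!" for a in affirmations]:
--         return "Sounds good! Anything else I can help you with?"
--
--     # Goodbye
--     goodbyes = ["bye", "goodbye", "see you", "see ya", "later", "bye!"]
--     if msg_lower in goodbyes:
--         return "Goodbye! Feel free to come back anytime you need help. Have a great day!"
--
--     # Simple yes/no
--     if msg_lower in ["yes", "yeah", "yep", "yup", "sure"]:
--         return "Great! What would you like to do?"
--
--     if msg_lower in ["no", "nope", "nah"]:
--         return "No problem! Let me know if you need anything else."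
--
--     return None
-- ===== SOURCE B (Python) =====
-- # B: character trie walked one char at a time, instead of A's sequential
-- # membership scans over phrase tables.
--
-- _GREETINGS = {
--     "hi": "Hey! How can I help you today?",
--     "hello": "Hello! What can I do for you?",
--     "hey": "Hey there! What's on your mind?",
--     "good morning": "Good morning! How can I assist you today?",
--     "good afternoon": "Good afternoon! What can I help you with?",
--     "good evening": "Good evening! How may I help you?",
-- }
--
-- _HOW_ARE_YOU = "I'm doing great, thanks for asking! I'm excited to help you with whatever you need. What's on your mind today?"
-- _THANKS = "You're very welcome! Happy to help anytime. Is there anything else you'd like to explore?"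
-- _AFFIRM = "Sounds good! Anything else I can help you with?"
-- _BYE = "Goodbye! Feel free to come back anytime you need help. Have a great day!"
-- _YES = "Great! What would you like to do?"
-- _NO = "No problem! Let me know if you need anything else."
--
-- _ROOT = {}
--
-- def _trie_insert(phrase, response):
--     node = _ROOT
--     for ch in phrase:
--         node = node.setdefault(ch, {})
--     node[None] = response  # None key marks a terminal node
--
-- for _g, _r in _GREETINGS.items():
--     _trie_insert(_g, _r)
--     _trie_insert(_g + "!", _r)
-- for _p in ("how are you", "how are you?", "how r u", "how are u",
--            "how's it going", "how is it going", "what's up", "whats up",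
--            "sup", "how you doing"):
--     _trie_insert(_p, _HOW_ARE_YOU)
-- for _p in ("thank you", "thanks", "thx", "ty", "thank u", "thank you!", "thanks!"):
--     _trie_insert(_p, _THANKS)
-- for _p in ("ok", "okay", "cool", "nice", "great", "awesome", "perfect"):
--     _trie_insert(_p, _AFFIRM)
--     _trie_insert(_p + "!", _AFFIRM)
-- for _p in ("bye", "goodbye", "see you", "see ya", "later", "bye!"):
--     _trie_insert(_p, _BYE)
-- for _p in ("yes", "yeah", "yep", "yup", "sure"):
--     _trie_insert(_p, _YES)
-- for _p in ("no", "nope", "nah"):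
--     _trie_insert(_p, _NO)
--
--
-- def _handle_social_message(message: str):
--     node = _ROOT
--     for ch in message.lower().strip():
--         node = node.get(ch)
--         if node is None:
--             return None
--     return node.get(None)
-- ===== Notes on version B (the rewrite author's own statement) =====
-- stated objective: alternative
-- what changed: B builds a character trie of all recognized phrases (including '!' variants) once and recognizes the lowered, stripped message by walking it character by character, replacing A's greetings loop and six sequential list-membership scans.
import Mathlib
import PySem

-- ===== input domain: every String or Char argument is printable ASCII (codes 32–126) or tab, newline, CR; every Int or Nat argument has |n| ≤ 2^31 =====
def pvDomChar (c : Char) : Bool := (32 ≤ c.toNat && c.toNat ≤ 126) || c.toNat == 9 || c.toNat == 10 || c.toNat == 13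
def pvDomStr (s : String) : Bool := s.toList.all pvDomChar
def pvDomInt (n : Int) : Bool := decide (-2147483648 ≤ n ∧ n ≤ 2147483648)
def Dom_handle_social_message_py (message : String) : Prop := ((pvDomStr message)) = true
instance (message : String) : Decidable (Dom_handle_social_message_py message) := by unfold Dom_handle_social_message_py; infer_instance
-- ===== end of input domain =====

-- B recognizes the lowered, stripped message by walking a precomputed character trie of
-- all recognized phrases instead of A's greetings loop plus six sequential membership scans
-- (objective: alternative algorithm/data structure, same exact behaviour).

-- ===== PORT A =====
def pvGreetings : List (String × String) :=
  [("hi", "Hey! How can I help you today?"),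
   ("hello", "Hello! What can I do for you?"),
   ("hey", "Hey there! What's on your mind?"),
   ("good morning", "Good morning! How can I assist you today?"),
   ("good afternoon", "Good afternoon! What can I help you with?"),
   ("good evening", "Good evening! How may I help you?")]

-- the 'for greeting, response in greetings.items(): if … return response' loop
def pvGreetLoop : List (String × String) → String → Option String
  | [], _ => none
  | (g, r) :: rest, t => if t == g || t == g ++ "!" then some r else pvGreetLoop rest t

def pvHowAreYou : List String :=
  ["how are you", "how are you?", "how r u", "how are u",
   "how's it going", "how is it going", "what's up", "whats up",
   "sup", "how you doing"]

def pvThanks : List String := ["thank you", "thanks", "thx", "ty", "thank u", "thank you!", "thanks!"]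
def pvAffirmations : List String := ["ok", "okay", "cool", "nice", "great", "awesome", "perfect"]
def pvGoodbyes : List String := ["bye", "goodbye", "see you", "see ya", "later", "bye!"]

def handle_social_message_py (message : String) : Option String :=
  let msg_lower := PySem.Str.strip (PySem.Str.lower message)
  match pvGreetLoop pvGreetings msg_lower with
  | some r => some r
  | none =>
    if pvHowAreYou.contains msg_lower then
      some "I'm doing great, thanks for asking! I'm excited to help you with whatever you need. What's on your mind today?"
    else if pvThanks.contains msg_lower then
      some "You're very welcome! Happy to help anytime. Is there anything else you'd like to explore?"
    else if pvAffirmations.contains msg_lower || (pvAffirmations.map (fun a => a ++ "!")).contains msg_lower then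
      some "Sounds good! Anything else I can help you with?"
    else if pvGoodbyes.contains msg_lower then
      some "Goodbye! Feel free to come back anytime you need help. Have a great day!"
    else if (["yes", "yeah", "yep", "yup", "sure"] : List String).contains msg_lower then
      some "Great! What would you like to do?"
    else if (["no", "nope", "nah"] : List String).contains msg_lower then
      some "No problem! Let me know if you need anything else."
    else none

-- ===== PORT B =====
-- first-child / next-sibling character trie (mirrors Source B's nested-dict trie;
-- a node's value plays the role of the Python trie's None-key terminal entry)
inductive PvTrie where
  | nil : PvTrie
  | node (c : Char) (val : Option String) (child : PvTrie) (sib : PvTrie) : PvTrie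
deriving DecidableEq, Repr

-- node.get(ch): scan the sibling chain for character x (value, child) if present
def pvChainFind : PvTrie → Char → Option (Option String × PvTrie)
  | .nil, _ => none
  | .node c w ch sib, x => if x = c then some (w, ch) else pvChainFind sib x

-- node.setdefault(ch, {}) followed by updating value/child at that entry
def pvChainModify : PvTrie → Char → (Option String → Option String) → (PvTrie → PvTrie) → PvTrie
  | .nil, x, fv, fc => .node x (fv none) (fc .nil) .nil
  | .node c w ch sib, x, fv, fc =>
    if x = c then .node c (fv w) (fc ch) sib
    else .node c w ch (pvChainModify sib x fv fc)

-- _trie_insert: walk/extend the trie along the phrase, set the terminal value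
def pvTrieInsert : List Char → String → PvTrie → PvTrie
  | [], _, t => t
  | [x], v, t => pvChainModify t x (fun _ => some v) (fun ch => ch)
  | x :: y :: xs, v, t => pvChainModify t x (fun w => w) (fun ch => pvTrieInsert (y :: xs) v ch)

-- the lookup loop of _handle_social_message: follow one child edge per character
def pvTrieLookup : List Char → PvTrie → Option String
  | [], _ => none
  | [x], t => match pvChainFind t x with | none => none | some (w, _) => w
  | x :: y :: xs, t => match pvChainFind t x with | none => none | some (_, ch) => pvTrieLookup (y :: xs) ch

def pvPairs : List (String × String) :=
  [("hi", "Hey! How can I help you today?"),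
   ("hi!", "Hey! How can I help you today?"),
   ("hello", "Hello! What can I do for you?"),
   ("hello!", "Hello! What can I do for you?"),
   ("hey", "Hey there! What's on your mind?"),
   ("hey!", "Hey there! What's on your mind?"),
   ("good morning", "Good morning! How can I assist you today?"),
   ("good morning!", "Good morning! How can I assist you today?"),
   ("good afternoon", "Good afternoon! What can I help you with?"),
   ("good afternoon!", "Good afternoon! What can I help you with?"),
   ("good evening", "Good evening! How may I help you?"),
   ("good evening!", "Good evening! How may I help you?"),
   ("how are you", "I'm doing great, thanks for asking! I'm excited to help you with whatever you need. What's on your mind today?"),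
   ("how are you?", "I'm doing great, thanks for asking! I'm excited to help you with whatever you need. What's on your mind today?"),
   ("how r u", "I'm doing great, thanks for asking! I'm excited to help you with whatever you need. What's on your mind today?"),
   ("how are u", "I'm doing great, thanks for asking! I'm excited to help you with whatever you need. What's on your mind today?"),
   ("how's it going", "I'm doing great, thanks for asking! I'm excited to help you with whatever you need. What's on your mind today?"),
   ("how is it going", "I'm doing great, thanks for asking! I'm excited to help you with whatever you need. What's on your mind today?"),
   ("what's up", "I'm doing great, thanks for asking! I'm excited to help you with whatever you need. What's on your mind today?"),
   ("whats up", "I'm doing great, thanks for asking! I'm excited to help you with whatever you need. What's on your mind today?"),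
   ("sup", "I'm doing great, thanks for asking! I'm excited to help you with whatever you need. What's on your mind today?"),
   ("how you doing", "I'm doing great, thanks for asking! I'm excited to help you with whatever you need. What's on your mind today?"),
   ("thank you", "You're very welcome! Happy to help anytime. Is there anything else you'd like to explore?"),
   ("thanks", "You're very welcome! Happy to help anytime. Is there anything else you'd like to explore?"),
   ("thx", "You're very welcome! Happy to help anytime. Is there anything else you'd like to explore?"),
   ("ty", "You're very welcome! Happy to help anytime. Is there anything else you'd like to explore?"),
   ("thank u", "You're very welcome! Happy to help anytime. Is there anything else you'd like to explore?"),
   ("thank you!", "You're very welcome! Happy to help anytime. Is there anything else you'd like to explore?"),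
   ("thanks!", "You're very welcome! Happy to help anytime. Is there anything else you'd like to explore?"),
   ("ok", "Sounds good! Anything else I can help you with?"),
   ("ok!", "Sounds good! Anything else I can help you with?"),
   ("okay", "Sounds good! Anything else I can help you with?"),
   ("okay!", "Sounds good! Anything else I can help you with?"),
   ("cool", "Sounds good! Anything else I can help you with?"),
   ("cool!", "Sounds good! Anything else I can help you with?"),
   ("nice", "Sounds good! Anything else I can help you with?"),
   ("nice!", "Sounds good! Anything else I can help you with?"),
   ("great", "Sounds good! Anything else I can help you with?"),
   ("great!", "Sounds good! Anything else I can help you with?"),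
   ("awesome", "Sounds good! Anything else I can help you with?"),
   ("awesome!", "Sounds good! Anything else I can help you with?"),
   ("perfect", "Sounds good! Anything else I can help you with?"),
   ("perfect!", "Sounds good! Anything else I can help you with?"),
   ("bye", "Goodbye! Feel free to come back anytime you need help. Have a great day!"),
   ("goodbye", "Goodbye! Feel free to come back anytime you need help. Have a great day!"),
   ("see you", "Goodbye! Feel free to come back anytime you need help. Have a great day!"),
   ("see ya", "Goodbye! Feel free to come back anytime you need help. Have a great day!"),
   ("later", "Goodbye! Feel free to come back anytime you need help. Have a great day!"),
   ("bye!", "Goodbye! Feel free to come back anytime you need help. Have a great day!"),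
   ("yes", "Great! What would you like to do?"),
   ("yeah", "Great! What would you like to do?"),
   ("yep", "Great! What would you like to do?"),
   ("yup", "Great! What would you like to do?"),
   ("sure", "Great! What would you like to do?"),
   ("no", "No problem! Let me know if you need anything else."),
   ("nope", "No problem! Let me know if you need anything else."),
   ("nah", "No problem! Let me know if you need anything else.")]

def pvTrie : PvTrie := pvPairs.foldl (fun tr p => pvTrieInsert p.1.toList p.2 tr) .nil

def handle_social_message_py_alt (message : String) : Option String :=
  pvTrieLookup (PySem.Str.strip (PySem.Str.lower message)).toList pvTrie

-- ===== PRECONDITION & SPEC =====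
def Spec_handle_social_message_py (message : String) (out : Option String) : Prop := out = handle_social_message_py_alt message
instance (message : String) (out : Option String) : Decidable (Spec_handle_social_message_py message out) := by unfold Spec_handle_social_message_py; infer_instance

-- ===== CLAIM (what is proved, stated in full; the proofs are below) =====
def Claim_equal_handle_social_message_py : Prop := ∀ (message : String), Dom_handle_social_message_py message → Spec_handle_social_message_py message (handle_social_message_py message)

-- ===== LEMMAS AND PROOFS =====

def pvKeys : List String := pvPairs.map (·.1)

theorem pv_lookup_nil (t : List Char) : pvTrieLookup t .nil = none := by
  match t with
  | [] => rfl
  | [x] => rfl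
  | x :: y :: xs => rfl

theorem pv_find_modify_self (tr : PvTrie) (x : Char)
    (fv : Option String → Option String) (fc : PvTrie → PvTrie) :
    pvChainFind (pvChainModify tr x fv fc) x
      = some (match pvChainFind tr x with
              | none => (fv none, fc .nil)
              | some (w, ch) => (fv w, fc ch)) := by
  induction tr with
  | nil => simp [pvChainFind, pvChainModify]
  | node c w ch sib ihc ihs =>
    by_cases hxc : x = c <;> simp [pvChainFind, pvChainModify, hxc, ihs]

theorem pv_find_modify_ne (tr : PvTrie) (x y : Char)
    (fv : Option String → Option String) (fc : PvTrie → PvTrie) (hyx : y ≠ x) :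
    pvChainFind (pvChainModify tr x fv fc) y = pvChainFind tr y := by
  induction tr with
  | nil => simp [pvChainFind, pvChainModify, hyx]
  | node c w ch sib ihc ihs =>
    by_cases hxc : x = c
    · subst hxc; simp [pvChainFind, pvChainModify, hyx]
    · by_cases hyc : y = c <;> simp [pvChainFind, pvChainModify, hxc, hyc, ihs]

-- a lookup in an insert either hits the inserted key or was already present
theorem pv_lookup_insert (k : List Char) (v : String) (tr : PvTrie) (t : List Char)
    (h : pvTrieLookup t (pvTrieInsert k v tr) ≠ none) :
    t = k ∨ pvTrieLookup t tr ≠ none := by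
  induction k generalizing tr t with
  | nil => exact Or.inr (by simpa [pvTrieInsert] using h)
  | cons x xs ih =>
    match xs, t with
    | _, [] => simp [pvTrieLookup] at h
    | [], [y] =>
      simp only [pvTrieInsert, pvTrieLookup] at h
      by_cases hyx : y = x
      · exact Or.inl (by simp [hyx])
      · rw [pv_find_modify_ne tr x y _ _ hyx] at h
        exact Or.inr (by simpa [pvTrieLookup] using h)
    | [], y :: z :: zs =>
      simp only [pvTrieInsert, pvTrieLookup] at h
      by_cases hyx : y = x
      · subst hyx
        rw [pv_find_modify_self] at h
        match hfind : pvChainFind tr y with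
        | none => rw [hfind] at h; simp [pv_lookup_nil] at h
        | some (w, ch) =>
          rw [hfind] at h
          exact Or.inr (by simpa [pvTrieLookup, hfind] using h)
      · rw [pv_find_modify_ne tr x y _ _ hyx] at h
        exact Or.inr (by simpa [pvTrieLookup] using h)
    | x' :: xs', [y] =>
      simp only [pvTrieInsert, pvTrieLookup] at h
      by_cases hyx : y = x
      · subst hyx
        rw [pv_find_modify_self] at h
        match hfind : pvChainFind tr y with
        | none => rw [hfind] at h; simp at h
        | some (w, ch) =>
          rw [hfind] at h
          exact Or.inr (by simpa [pvTrieLookup, hfind] using h)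
      · rw [pv_find_modify_ne tr x y _ _ hyx] at h
        exact Or.inr (by simpa [pvTrieLookup] using h)
    | x' :: xs', y :: z :: zs =>
      simp only [pvTrieInsert, pvTrieLookup] at h
      by_cases hyx : y = x
      · subst hyx
        rw [pv_find_modify_self] at h
        match hfind : pvChainFind tr y with
        | none =>
          rw [hfind] at h
          simp only at h
          rcases ih .nil (z :: zs) h with h1 | h1
          · exact Or.inl (by rw [h1])
          · exact absurd (pv_lookup_nil (z :: zs)) h1
        | some (w, ch) =>
          rw [hfind] at h
          simp only at h
          rcases ih ch (z :: zs) h with h1 | h1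
          · exact Or.inl (by rw [h1])
          · exact Or.inr (by simpa [pvTrieLookup, hfind] using h1)
      · rw [pv_find_modify_ne tr x y _ _ hyx] at h
        exact Or.inr (by simpa [pvTrieLookup] using h)

-- every key that the built trie recognizes is one of the inserted phrases
theorem pv_lookup_build (ps : List (String × String)) (tr : PvTrie) (t : List Char)
    (h : pvTrieLookup t (ps.foldl (fun tr p => pvTrieInsert p.1.toList p.2 tr) tr) ≠ none) :
    t ∈ ps.map (fun p => p.1.toList) ∨ pvTrieLookup t tr ≠ none := by
  induction ps generalizing tr with
  | nil => exact Or.inr h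
  | cons p rest ih =>
    simp only [List.foldl_cons] at h
    rcases ih _ h with h1 | h1
    · exact Or.inl (by simp at h1 ⊢; exact Or.inr h1)
    · rcases pv_lookup_insert _ _ _ _ h1 with h2 | h2
      · exact Or.inl (by simp [h2])
      · exact Or.inr h2

-- the two bodies agree on every lowered/stripped string t
set_option maxHeartbeats 4000000 in
theorem pv_core (t : String) :
    (match pvGreetLoop pvGreetings t with
      | some r => some r
      | none =>
        if pvHowAreYou.contains t then
          some "I'm doing great, thanks for asking! I'm excited to help you with whatever you need. What's on your mind today?"
        else if pvThanks.contains t then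
          some "You're very welcome! Happy to help anytime. Is there anything else you'd like to explore?"
        else if pvAffirmations.contains t || (pvAffirmations.map (fun a => a ++ "!")).contains t then
          some "Sounds good! Anything else I can help you with?"
        else if pvGoodbyes.contains t then
          some "Goodbye! Feel free to come back anytime you need help. Have a great day!"
        else if (["yes", "yeah", "yep", "yup", "sure"] : List String).contains t then
          some "Great! What would you like to do?"
        else if (["no", "nope", "nah"] : List String).contains t then
          some "No problem! Let me know if you need anything else."
        else none)
    = pvTrieLookup t.toList pvTrie := by
  by_cases h : t ∈ pvKeys
  · fin_cases h <;> rfl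
  · have hB : pvTrieLookup t.toList pvTrie = none := by
      by_contra hne
      rcases pv_lookup_build pvPairs .nil t.toList hne with h1 | h1
      · simp only [List.mem_map] at h1
        rcases h1 with ⟨p, hp, heq⟩
        have : t = p.1 := by
          apply String.ext
          simpa [String.toList] using heq.symm
        exact h (by simp only [pvKeys, List.mem_map]; exact ⟨p, hp, this.symm⟩)
      · exact h1 (pv_lookup_nil t.toList)
    rw [hB]
    simp only [pvKeys, pvPairs, List.map_cons, List.map_nil, List.mem_cons, not_or] at h
    simp [pvGreetLoop, pvGreetings, pvHowAreYou, pvThanks, pvAffirmations, pvGoodbyes, h]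

-- ===== VERDICT (by name: the statement is the Claim_ definition above) =====
set_option maxHeartbeats 2000000 in
theorem handle_social_message_py_spec : Claim_equal_handle_social_message_py := by
  intro message _
  unfold Spec_handle_social_message_py handle_social_message_py handle_social_message_py_alt
  exact pv_core _
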